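-- pv_equiv track=rewrite | github.com/hsh5206/Algorithm_python | 프로그래머스/문제/Lv1. 신고 결과 받기.py | solution
-- ===== SOURCE A (Python) =====
-- from collections import defaultdict
--
-- def solution(id_list, reports, k):
--     reported = dict()
--     for report in reports:
--         x, y = report.split(' ')
--         if not reported.get(y):
--             reported[y] = set([x])
--         else:
--             reported[y].add(x)
--
--     result = defaultdict(int)
--     for id in id_list:
--         if reported.get(id) and len(reported[id]) >= k:
--             for x in reported[id]:
--                 result[x] += 1
--
--     answer = [0] * len(id_list)
--     for i, id in enumerate(id_list):
--         answer[i] = result[id]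
--     return answer
-- ===== SOURCE B (Python) =====
-- from collections import Counter
--
-- def solution(id_list, reports, k):
--     pairs = {tuple(report.split(' ')) for report in reports}
--     cnt = Counter(y for _, y in pairs)
--     return [sum(1 for target in id_list if cnt[target] >= k and (id, target) in pairs)
--             for id in id_list]
-- ===== Notes on version B (the rewrite author's own statement) =====
-- stated objective: alternative
-- what changed: Instead of building a dict of per-target reporter sets and iterating each banned target's set to accumulate a result dict, B dedups reports into one set of (reporter, target) pairs, counts distinct reporters per target with a Counter, and computes each output directly as a count over id_list of banned targets the id reported.
import Mathlib
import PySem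

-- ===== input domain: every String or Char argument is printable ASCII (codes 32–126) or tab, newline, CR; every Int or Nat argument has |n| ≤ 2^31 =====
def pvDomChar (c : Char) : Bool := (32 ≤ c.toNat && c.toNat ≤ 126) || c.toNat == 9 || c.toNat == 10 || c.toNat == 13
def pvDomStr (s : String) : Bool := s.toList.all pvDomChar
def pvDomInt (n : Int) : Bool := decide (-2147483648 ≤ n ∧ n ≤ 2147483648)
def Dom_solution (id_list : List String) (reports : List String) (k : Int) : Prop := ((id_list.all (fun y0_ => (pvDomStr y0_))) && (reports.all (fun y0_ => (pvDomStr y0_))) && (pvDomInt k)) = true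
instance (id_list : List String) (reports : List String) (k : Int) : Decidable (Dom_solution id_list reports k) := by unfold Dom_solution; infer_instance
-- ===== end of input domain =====

-- B replaces A's per-id iteration over reporter sets by one deduplicated pair set with a
-- Counter and a direct per-output count; objective: alternative (same value, different decomposition).

-- ===== PORT A =====
-- first loop: reported[y] = set of users who reported y (dedup, first-insertion order)
def buildReported (reports : List String) : PySem.Dict String (PySem.Set String) :=
  reports.foldl (fun d report =>
    match (PySem.Str.split? report " ").getD [] with   -- sep " " ≠ "", so split? is always `some`
    | [x, y] =>
      -- `if not reported.get(y)` : falsy = missing key or empty set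
      match d.get? y with
      | none => d.insert y (PySem.Set.ofList [x])
      | some s =>
        if s = [] then d.insert y (PySem.Set.ofList [x])
        else d.insert y (PySem.Set.add s x)            -- reported[y].add(x), mutation in place
    | _ => d)  -- `x, y = report.split(' ')` raises ValueError here; Pre_solution excludes these inputs
    PySem.Dict.empty

-- second loop: result[x] += 1 for every reporter x of a banned id (defaultdict(int))
def accumBans (reported : PySem.Dict String (PySem.Set String)) (id_list : List String)
    (k : Int) : PySem.Dict String Int :=
  id_list.foldl (fun result id =>
    match reported.get? id with
    | some s =>                                        -- `reported.get(id) and len(reported[id]) >= k`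
      if s ≠ [] ∧ (s.length : Int) ≥ k then
        s.foldl (fun r x => r.modify x 0 (· + 1)) result
      else result
    | none => result)
    PySem.Dict.empty

def solution (id_list : List String) (reports : List String) (k : Int) : List Int :=
  let reported := buildReported reports
  let result := accumBans reported id_list k
  -- answer = [0] * len(id_list); for i, id in enumerate(id_list): answer[i] = result[id]
  (PySem.List.enumerate id_list 0).foldl
    (fun ans p => ans.set p.1.toNat (result.getD p.2 0))  -- defaultdict read of a missing key = 0
    (List.replicate id_list.length 0)

-- ===== PORT B =====
-- pairs = {tuple(report.split(' ')) for report in reports}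
def pairsOf (reports : List String) : PySem.Set (String × String) :=
  reports.foldl (fun P report =>
    match (PySem.Str.split? report " ").getD [] with
    | [x, y] => PySem.Set.add P (x, y)
    | _ => P)  -- a tuple of another length makes `for _, y in pairs` raise; Pre_solution excludes
    PySem.Set.empty

def solution_alt (id_list : List String) (reports : List String) (k : Int) : List Int :=
  let pairs := pairsOf reports
  let cnt := PySem.Dict.counter (pairs.map Prod.snd)   -- Counter(y for _, y in pairs)
  id_list.map (fun id =>
    id_list.foldl (fun acc target =>
      if cnt.getD target 0 ≥ k ∧ (id, target) ∈ pairs then acc + 1 else acc) 0)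

-- ===== PRECONDITION & SPEC =====
-- Pre_ excludes exactly the reports not of the form "<x> <y>" (one single space): there
-- `x, y = report.split(' ')` raises ValueError in A (and B raises unpacking its tuples).
def Pre_solution (id_list : List String) (reports : List String) (k : Int) : Prop :=
  (reports.all (fun r => ((PySem.Str.split? r " ").getD []).length == 2)) = true
instance (id_list : List String) (reports : List String) (k : Int) : Decidable (Pre_solution id_list reports k) := by unfold Pre_solution; infer_instance

def pvWitness_solution : List String × List String × Int := (["muzi", "frodo"], ["muzi frodo", "frodo muzi"], 1)

def Spec_solution (id_list : List String) (reports : List String) (k : Int) (out : List Int) : Prop := out = solution_alt id_list reports k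
instance (id_list : List String) (reports : List String) (k : Int) (out : List Int) : Decidable (Spec_solution id_list reports k out) := by unfold Spec_solution; infer_instance

-- ===== CLAIM (what is proved, stated in full; the proofs are below) =====
def Claim_equal_solution : Prop := ∀ (id_list : List String) (reports : List String) (k : Int), Dom_solution id_list reports k → Pre_solution id_list reports k → Spec_solution id_list reports k (solution id_list reports k)

-- ===== LEMMAS AND PROOFS =====

-- reporters of y, read off B's pair set
def repsOf (P : PySem.Set (String × String)) (y : String) : List String :=
  (P.filter (fun p => p.2 == y)).map Prod.fst

-- joint invariant of A's dict and B's set along the first loop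
def RelAB (d : PySem.Dict String (PySem.Set String)) (P : PySem.Set (String × String)) : Prop :=
  P.Nodup ∧ ∀ y, d.get? y = if repsOf P y = [] then none else some (repsOf P y)

lemma mem_repsOf (P : PySem.Set (String × String)) (x y : String) :
    x ∈ repsOf P y ↔ (x, y) ∈ P := by
  simp only [repsOf, List.mem_map, List.mem_filter, beq_iff_eq]
  constructor
  · rintro ⟨⟨a, b⟩, ⟨hm, hb⟩, hf⟩; cases hb; cases hf; exact hm
  · intro h; exact ⟨(x, y), ⟨h, rfl⟩, rfl⟩

lemma repsOf_append_same (P : PySem.Set (String × String)) (x y : String) :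
    repsOf (P ++ [(x, y)]) y = repsOf P y ++ [x] := by
  simp [repsOf]

lemma repsOf_append_other (P : PySem.Set (String × String)) (x y y' : String) (h : y' ≠ y) :
    repsOf (P ++ [(x, y)]) y' = repsOf P y' := by
  simp [repsOf, h.symm]

lemma nodup_repsOf (P : PySem.Set (String × String)) (hP : P.Nodup) (y : String) :
    (repsOf P y).Nodup := by
  refine (hP.filter _).map_on ?_
  intro a ha b hb hab
  have ha2 : a.2 = y := by simpa using (List.mem_filter.mp ha).2
  have hb2 : b.2 = y := by simpa using (List.mem_filter.mp hb).2
  exact Prod.ext hab (ha2.trans hb2.symm)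

lemma inv_step (d : PySem.Dict String (PySem.Set String)) (P : PySem.Set (String × String))
    (x y : String) (h : RelAB d P) :
    RelAB (match d.get? y with
         | none => d.insert y (PySem.Set.ofList [x])
         | some s => if s = [] then d.insert y (PySem.Set.ofList [x])
                     else d.insert y (PySem.Set.add s x))
        (PySem.Set.add P (x, y)) := by
  obtain ⟨hnd, hinv⟩ := h
  have hofl : PySem.Set.ofList [x] = [x] := rfl
  by_cases hmem : (x, y) ∈ P
  · -- pair already present: B's set unchanged; A's set already contains x
    have hx : x ∈ repsOf P y := (mem_repsOf P x y).mpr hmem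
    have hne : repsOf P y ≠ [] := List.ne_nil_of_mem hx
    have hgy : d.get? y = some (repsOf P y) := by rw [hinv y, if_neg hne]
    rw [PySem.Set.add_of_mem hmem, hgy]
    show RelAB (if repsOf P y = [] then d.insert y (PySem.Set.ofList [x])
                else d.insert y (PySem.Set.add (repsOf P y) x)) P
    rw [if_neg hne, PySem.Set.add_of_mem hx]
    refine ⟨hnd, fun y' => ?_⟩
    by_cases hy : y' = y
    · rw [hy, PySem.Dict.get?_insert_self, if_neg hne]
    · rw [PySem.Dict.get?_insert_of_ne _ _ hy, hinv y']
  · -- fresh pair: B appends; A appends x to y's set (or creates it)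
    have hx : x ∉ repsOf P y := fun hc => hmem ((mem_repsOf P x y).mp hc)
    rw [PySem.Set.add_of_not_mem hmem]
    have hnd' : (P ++ [(x, y)]).Nodup := by
      rw [List.nodup_append]
      refine ⟨hnd, List.nodup_singleton _, ?_⟩
      intro p hp q hq
      rw [List.mem_singleton.mp hq]
      intro hpq
      exact hmem (hpq ▸ hp)
    by_cases h0 : repsOf P y = []
    · have hgy : d.get? y = none := by rw [hinv y, if_pos h0]
      rw [hgy]
      show RelAB (d.insert y (PySem.Set.ofList [x])) (P ++ [(x, y)])
      refine ⟨hnd', fun y' => ?_⟩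
      by_cases hy : y' = y
      · rw [hy, PySem.Dict.get?_insert_self, repsOf_append_same, h0, hofl]
        simp
      · rw [PySem.Dict.get?_insert_of_ne _ _ hy, hinv y', repsOf_append_other P x y y' hy]
    · have hgy : d.get? y = some (repsOf P y) := by rw [hinv y, if_neg h0]
      rw [hgy]
      show RelAB (if repsOf P y = [] then d.insert y (PySem.Set.ofList [x])
                  else d.insert y (PySem.Set.add (repsOf P y) x)) (P ++ [(x, y)])
      rw [if_neg h0, PySem.Set.add_of_not_mem hx]
      refine ⟨hnd', fun y' => ?_⟩
      by_cases hy : y' = y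
      · rw [hy, PySem.Dict.get?_insert_self, repsOf_append_same]
        simp
      · rw [PySem.Dict.get?_insert_of_ne _ _ hy, hinv y', repsOf_append_other P x y y' hy]

lemma inv_fold (reports : List String) :
    RelAB (buildReported reports) (pairsOf reports) := by
  unfold buildReported pairsOf
  suffices h : ∀ (d : PySem.Dict String (PySem.Set String)) (P : PySem.Set (String × String)),
      RelAB d P →
      RelAB (reports.foldl (fun d report =>
            match (PySem.Str.split? report " ").getD [] with
            | [x, y] =>
              match d.get? y with
              | none => d.insert y (PySem.Set.ofList [x])
              | some s => if s = [] then d.insert y (PySem.Set.ofList [x])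
                          else d.insert y (PySem.Set.add s x)
            | _ => d) d)
          (reports.foldl (fun P report =>
            match (PySem.Str.split? report " ").getD [] with
            | [x, y] => PySem.Set.add P (x, y)
            | _ => P) P) by
    refine h _ _ ⟨List.nodup_nil, fun y => ?_⟩
    simp [repsOf, PySem.Set.empty, PySem.Dict.empty, PySem.Dict.get?]
  induction reports with
  | nil => intro d P h; exact h
  | cons r rs ih =>
    intro d P h
    simp only [List.foldl_cons]
    match hsp : (PySem.Str.split? r " ").getD [] with
    | [] => exact ih d P h
    | [x] => exact ih _ _ h
    | [x, y] => exact ih _ _ (inv_step d P x y h)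
    | x :: y :: z :: t => exact ih _ _ h

-- A's second loop: the value accumulated at x is a 0/1 sum over id_list
lemma accum_getD (reported : PySem.Dict String (PySem.Set String)) (k : Int) (x : String)
    (hset : ∀ t s, reported.get? t = some s → s.Nodup) :
    ∀ (ids : List String) (res : PySem.Dict String Int),
      (ids.foldl (fun result id =>
        match reported.get? id with
        | some s => if s ≠ [] ∧ (s.length : Int) ≥ k then
                      s.foldl (fun r x => r.modify x 0 (· + 1)) result
                    else result
        | none => result) res).getD x 0
      = res.getD x 0 + (ids.map (fun t =>
          match reported.get? t with
          | some s => if s ≠ [] ∧ (s.length : Int) ≥ k ∧ x ∈ s then (1 : Int) else 0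
          | none => 0)).sum := by
  intro ids
  induction ids with
  | nil => intro res; simp
  | cons t ts ih =>
    intro res
    simp only [List.foldl_cons, List.map_cons, List.sum_cons]
    rcases hg : reported.get? t with _ | s
    · rw [ih res]; ring
    · simp only [hg]
      
      by_cases hc : s ≠ [] ∧ (s.length : Int) ≥ k
      · rw [if_pos hc, ih, PySem.Dict.getD_foldl_modify_add_one]
        by_cases hx : x ∈ s
        · rw [List.count_eq_one_of_mem (hset t s hg) hx,
            if_pos (show s ≠ [] ∧ (s.length : Int) ≥ k ∧ x ∈ s from ⟨hc.1, hc.2, hx⟩)]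
          push_cast; ring
        · rw [List.count_eq_zero_of_not_mem hx,
            if_neg (show ¬(s ≠ [] ∧ (s.length : Int) ≥ k ∧ x ∈ s) from fun h => hx h.2.2)]
          push_cast; ring
      · rw [if_neg hc, ih,
          if_neg (show ¬(s ≠ [] ∧ (s.length : Int) ≥ k ∧ x ∈ s) from fun h => hc ⟨h.1, h.2.1⟩)]
        ring

-- B's inner loop: counting by foldl is the same 0/1 sum
lemma count_fold (c : String → Prop) [DecidablePred c] :
    ∀ (ids : List String) (acc : Int),
      (ids.foldl (fun acc t => if c t then acc + 1 else acc) acc)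
      = acc + (ids.map (fun t => if c t then (1 : Int) else 0)).sum := by
  intro ids
  induction ids with
  | nil => intro acc; simp
  | cons t ts ih =>
    intro acc
    simp only [List.foldl_cons, List.map_cons, List.sum_cons]
    by_cases h : c t
    · simp only [if_pos h]; rw [ih]; ring
    · simp only [if_neg h]; rw [ih]; ring

-- the per-target 0/1 terms of A and B agree
lemma term_eq (reports : List String) (k : Int) (x t : String) :
    (match (buildReported reports).get? t with
     | some s => if s ≠ [] ∧ (s.length : Int) ≥ k ∧ x ∈ s then (1 : Int) else 0
     | none => 0)
    = (if (PySem.Dict.counter ((pairsOf reports).map Prod.snd)).getD t 0 ≥ k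
          ∧ (x, t) ∈ pairsOf reports then (1 : Int) else 0) := by
  obtain ⟨hnd, hinv⟩ := inv_fold reports
  have hcnt : (PySem.Dict.counter ((pairsOf reports).map Prod.snd)).getD t 0
      = ((repsOf (pairsOf reports) t).length : Int) := by
    rw [PySem.Dict.getD_counter]
    simp only [repsOf, List.length_map, List.count_eq_countP, List.countP_eq_length_filter]
    rw [List.filter_map]
    simp [Function.comp_def]
  have hmem : (x, t) ∈ pairsOf reports ↔ x ∈ repsOf (pairsOf reports) t :=
    (mem_repsOf _ x t).symm
  rw [hinv t]
  by_cases h0 : repsOf (pairsOf reports) t = []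
  · simp [h0, hcnt, hmem]
  · simp only [if_neg h0]
    by_cases hb : ((repsOf (pairsOf reports) t).length : Int) ≥ k ∧ x ∈ repsOf (pairsOf reports) t
    · rw [if_pos ⟨h0, hb.1, hb.2⟩, if_pos (by rw [hcnt, hmem]; exact hb)]
    · rw [if_neg (fun h => hb ⟨h.2.1, h.2.2⟩), if_neg (by rw [hcnt, hmem]; exact hb)]

-- enumerate/set over [0]*n writes exactly the mapped list
lemma setfold_eq_map (f : String → Int) :
    ∀ (xs : List String) (pre : List Int),
      ((PySem.List.enumerate xs (pre.length : Int)).foldl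
        (fun a p => a.set p.1.toNat (f p.2)) (pre ++ List.replicate xs.length 0))
      = pre ++ xs.map f := by
  intro xs
  induction xs with
  | nil => intro pre; simp [PySem.List.enumerate]
  | cons x t ih =>
    intro pre
    have h1 : PySem.List.enumerate (x :: t) (pre.length : Int)
        = ((pre.length : Int), x) :: PySem.List.enumerate t ((pre.length : Int) + 1) := rfl
    rw [h1]
    simp only [List.foldl_cons, List.length_cons, List.replicate_succ]
    have h2 : (pre ++ 0 :: List.replicate t.length 0).set ((pre.length : Int)).toNat (f x)
        = (pre ++ [f x]) ++ List.replicate t.length 0 := by simp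
    rw [h2]
    have h3 : ((pre.length : Int) + 1) = (((pre ++ [f x]).length : Nat) : Int) := by simp
    rw [h3, ih (pre ++ [f x])]
    simp

-- ===== VERDICT (by name: the statement is the Claim_ definition above) =====
theorem solution_spec : Claim_equal_solution := by
  intro id_list reports k _hdom _hpre
  unfold Spec_solution solution solution_alt
  obtain ⟨hnd, hinv⟩ := inv_fold reports
  have hset : ∀ t s, (buildReported reports).get? t = some s → s.Nodup := by
    intro t s hg
    rw [hinv t] at hg
    by_cases h0 : repsOf (pairsOf reports) t = []
    · rw [if_pos h0] at hg; cases hg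
    · rw [if_neg h0] at hg
      cases hg
      exact nodup_repsOf _ hnd t
  have hmain := setfold_eq_map
    (fun id => (accumBans (buildReported reports) id_list k).getD id 0) id_list []
  simp only [List.length_nil, Nat.cast_zero, List.nil_append] at hmain
  rw [hmain]
  apply List.map_congr_left
  intro id _
  unfold accumBans
  rw [accum_getD (buildReported reports) k id hset id_list PySem.Dict.empty]
  rw [count_fold (fun target =>
    (PySem.Dict.counter ((pairsOf reports).map Prod.snd)).getD target 0 ≥ k
      ∧ (id, target) ∈ pairsOf reports) id_list 0]
  have hz : (PySem.Dict.empty : PySem.Dict String Int).getD id 0 = 0 := rfl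
  rw [hz, zero_add, zero_add]
  apply congrArg List.sum
  apply List.map_congr_left
  intro t _
  exact term_eq reports k id t
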